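-- pv_equiv track=rewrite | github.com/Multu/vps | level0/lesson25/main.py | TransformTransform
-- ===== SOURCE A (Python) =====
-- def max_value_in_range(value_list, from_pos, to_pos):
--     max_value = value_list[from_pos]
--
--     for i in range(to_pos + 1):
--         if value_list[i] > max_value:
--             max_value = value_list[i]
--
--     return max_value
--
-- def transform(a):
--     b = []
--
--     for i in range(len(a)):
--         for j in range(len(a) - i):
--             k = i + j
--             max_value = max_value_in_range(a, j, k)
--             b.append(max_value)
--
--     return b
--
-- def TransformTransform(a, n):
--     s_a = transform(a)
--     s_s_a = transform(s_a)
--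
--     key_value = 0
--     for i in range(len(s_s_a)):
--         key_value += s_s_a[i]
--
--     is_even = key_value % 2 == 0
--     return is_even
-- ===== SOURCE B (Python) =====
-- def TransformTransform(a, n):
--     # prefix maxima of a, computed once
--     pm = []
--     cur = None
--     for x in a:
--         if cur is None or x > cur:
--             cur = x
--         pm.append(cur)
--
--     # s_a = transform(a) expressed through the prefix maxima
--     s_a = [pm[i + j] for i in range(len(a)) for j in range(len(a) - i)]
--
--     # sum(transform(s_a)) = sum over k of (k+1) * prefix_max(s_a, k)
--     total = 0
--     cur = None
--     w = 1
--     for x in s_a: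
--         if cur is None or x > cur:
--             cur = x
--         total += w * cur
--         w += 1
--
--     return total % 2 == 0
-- ===== Notes on version B (the rewrite author's own statement) =====
-- stated objective: faster
-- what changed: A's inner max scan always scans the whole prefix 0..k, so both transforms only produce prefix maxima; B computes the prefix maxima of a once, builds transform(a) by lookups, and folds sum(transform(transform(a))) as a single weighted running-max pass instead of re-materializing the quadratic-size second transform.
import Mathlib
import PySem

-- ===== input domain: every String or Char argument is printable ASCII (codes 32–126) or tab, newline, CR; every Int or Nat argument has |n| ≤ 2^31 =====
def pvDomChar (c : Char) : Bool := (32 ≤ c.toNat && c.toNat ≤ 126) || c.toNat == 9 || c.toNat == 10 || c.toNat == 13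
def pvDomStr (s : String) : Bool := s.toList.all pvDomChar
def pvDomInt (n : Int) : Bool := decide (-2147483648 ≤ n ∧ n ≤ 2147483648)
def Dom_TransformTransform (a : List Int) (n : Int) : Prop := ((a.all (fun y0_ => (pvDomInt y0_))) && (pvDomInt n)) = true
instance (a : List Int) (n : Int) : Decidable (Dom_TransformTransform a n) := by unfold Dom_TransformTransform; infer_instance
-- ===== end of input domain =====

-- B replaces A's repeated O(n^2) max scans (A's scan always covers the whole prefix 0..k) by one
-- prefix-maxima pass and a single weighted running-max fold; measured asymptotically faster.

-- ===== PORT A =====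
def maxValueInRange (valueList : List Int) (fromPos toPos : Nat) : Int :=
  (List.range (toPos + 1)).foldl
    (fun maxValue (i : Nat) =>
      if PySem.List.pyGetD valueList (i : Int) 0 > maxValue then
        PySem.List.pyGetD valueList (i : Int) 0
      else maxValue)
    (PySem.List.pyGetD valueList (fromPos : Int) 0)

def transform (a : List Int) : List Int :=
  (List.range a.length).foldl
    (fun b i =>
      (List.range (a.length - i)).foldl
        (fun b j => b ++ [maxValueInRange a j (i + j)]) b)
    []

def TransformTransform (a : List Int) (n : Int) : Bool :=
  let sA := transform a
  let sSA := transform sA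
  let keyValue :=
    (List.range sSA.length).foldl (fun kv (i : Nat) => kv + PySem.List.pyGetD sSA (i : Int) 0) 0
  PySem.Int.mod keyValue 2 == 0

-- ===== PORT B =====
def TransformTransform_alt (a : List Int) (n : Int) : Bool :=
  -- prefix maxima of a, computed once
  let pm := (a.foldl
      (fun (st : List Int × Option Int) x =>
        let cur := match st.2 with
          | none => x
          | some c => if x > c then x else c
        (st.1 ++ [cur], some cur))
      ([], none)).1
  -- s_a = transform(a) expressed through the prefix maxima
  let sA := (List.range a.length).flatMap (fun i =>
      (List.range (a.length - i)).map (fun j => PySem.List.pyGetD pm ((i + j : Nat) : Int) 0))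
  -- sum(transform(s_a)) as one weighted running-max pass
  let total := (sA.foldl
      (fun (st : Int × Option Int × Int) x =>
        let cur := match st.2.1 with
          | none => x
          | some c => if x > c then x else c
        (st.1 + st.2.2 * cur, some cur, st.2.2 + 1))
      (0, none, 1)).1
  PySem.Int.mod total 2 == 0

-- ===== PRECONDITION & SPEC =====
def Spec_TransformTransform (a : List Int) (n : Int) (out : Bool) : Prop := out = TransformTransform_alt a n
instance (a : List Int) (n : Int) (out : Bool) : Decidable (Spec_TransformTransform a n out) := by unfold Spec_TransformTransform; infer_instance

-- ===== CLAIM (what is proved, stated in full; the proofs are below) =====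
def Claim_equal_TransformTransform : Prop := ∀ (a : List Int) (n : Int), Dom_TransformTransform a n → Spec_TransformTransform a n (TransformTransform a n)

-- ===== LEMMAS AND PROOFS =====

-- max of a[0..k] (junk 0 outside range; only used with k < a.length)
def mp : List Int → Nat → Int
  | [], _ => 0
  | x :: _, 0 => x
  | x :: xs, k + 1 => max x (mp xs k)

theorem mp_zero (a : List Int) (h : 0 < a.length) : mp a 0 = a[0]?.getD 0 := by
  cases a with
  | nil => simp at h
  | cons x xs => rfl

theorem mp_succ : ∀ (a : List Int) (k : Nat), k + 1 < a.length →
    mp a (k + 1) = max (mp a k) (a.getD (k + 1) 0)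
  | [], k, h => by simp at h
  | x :: xs, 0, h => by
      cases xs with
      | nil => simp at h
      | cons y ys => simp [mp]
  | x :: xs, k + 1, h => by
      have hx : k + 1 < xs.length := by simpa using h
      simp only [mp, List.getD_cons_succ, mp_succ xs k hx, max_assoc]

theorem getD_le_mp : ∀ (a : List Int) (k : Nat), k < a.length → a.getD k 0 ≤ mp a k
  | [], k, h => by simp at h
  | x :: xs, 0, _ => le_refl _
  | x :: xs, k + 1, h => by
      have := getD_le_mp xs k (by simpa using h)
      simp only [mp, List.getD_cons_succ]
      exact this.trans (le_max_right _ _)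

theorem mp_mono (a : List Int) (j k : Nat) (hjk : j ≤ k) (hk : k < a.length) :
    mp a j ≤ mp a k := by
  induction k with
  | zero => simpa [Nat.le_zero.mp hjk] using le_refl (mp a 0)
  | succ m ih =>
      rcases Nat.lt_or_ge j (m + 1) with h | h
      · have : mp a j ≤ mp a m := ih (Nat.lt_succ_iff.mp h) (by omega)
        rw [mp_succ a m hk]
        exact this.trans (le_max_left _ _)
      · have : j = m + 1 := by omega
        simp [this]

theorem if_max (v m : Int) : (if v > m then v else m) = max m v := by
  rcases max_cases m v with ⟨h1, h2⟩ | ⟨h1, h2⟩ <;> simp [h1] <;> omega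

theorem mvr_fold (a : List Int) : ∀ (k : Nat) (s : Int), k < a.length →
    (List.range (k + 1)).foldl
      (fun m (i : Nat) => if PySem.List.pyGetD a (i : Int) 0 > m then PySem.List.pyGetD a (i : Int) 0 else m) s
      = max s (mp a k)
  | 0, s, h => by
      simp [List.range_succ, if_max, mp_zero a h]
  | k + 1, s, h => by
      rw [List.range_succ, List.foldl_append, mvr_fold a k s (by omega)]
      simp only [List.foldl_cons, List.foldl_nil, if_max, PySem.List.pyGetD_natCast]
      rw [mp_succ a k h, max_assoc]

theorem mvr_eq (a : List Int) (j k : Nat) (hjk : j ≤ k) (hk : k < a.length) :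
    maxValueInRange a j k = mp a k := by
  unfold maxValueInRange
  rw [mvr_fold a k _ hk]
  have h1 : a.getD j 0 ≤ mp a k :=
    (getD_le_mp a j (by omega)).trans (mp_mono a j k hjk hk)
  rw [List.getD_eq_getElem?_getD] at h1
  simp only [PySem.List.pyGetD_natCast, List.getD_eq_getElem?_getD]
  exact max_eq_right h1

-- the common shape of transform a (both directly for A, and via pm for B)
def sL (a : List Int) : List Int :=
  (List.range a.length).flatMap (fun i =>
    (List.range (a.length - i)).map (fun j => mp a (i + j)))

theorem transform_eq (a : List Int) : transform a = sL a := by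
  unfold transform sL
  rw [PySem.List.foldl_congr_mem
    (g := fun b i => b ++ (List.range (a.length - i)).map (fun j => maxValueInRange a j (i + j)))]
  · rw [PySem.List.foldl_append_eq_flatMap, List.nil_append]
    apply List.flatMap_congr
    intro i hi
    apply List.map_congr_left
    intro j hj
    exact mvr_eq a j (i + j) (by omega) (by
      simp only [List.mem_range] at hi hj; omega)
  · intro acc i _
    rw [PySem.List.foldl_append_singleton_eq_map]

-- prefix-maxima scan used in characterizing B's pm list
def smax : Int → List Int → List Int
  | _, [] => []
  | c, x :: xs => max c x :: smax (max c x) xs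

theorem pmLoop_inv : ∀ (xs acc : List Int) (c : Int),
    (xs.foldl
      (fun (st : List Int × Option Int) x =>
        let cur := match st.2 with
          | none => x
          | some c => if x > c then x else c
        (st.1 ++ [cur], some cur))
      (acc, some c)).1 = acc ++ smax c xs
  | [], acc, c => by simp [smax]
  | x :: xs, acc, c => by
      refine (pmLoop_inv xs (acc ++ [if x > c then x else c]) (if x > c then x else c)).trans ?_
      rw [if_max]
      simp [smax]

theorem smax_getD : ∀ (xs : List Int) (c : Int) (k : Nat), k < xs.length →
    (smax c xs).getD k 0 = max c (mp xs k)
  | [], c, k, h => by simp at h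
  | x :: xs, c, 0, _ => by simp [smax, mp]
  | x :: xs, c, k + 1, h => by
      simp only [smax, List.getD_cons_succ, mp]
      rw [smax_getD xs (max c x) k (by simpa using h), max_assoc]

theorem pm_getD (a : List Int) (k : Nat) (hk : k < a.length) :
    ((a.foldl
      (fun (st : List Int × Option Int) x =>
        let cur := match st.2 with
          | none => x
          | some c => if x > c then x else c
        (st.1 ++ [cur], some cur))
      ([], none)).1).getD k 0 = mp a k := by
  cases a with
  | nil => simp at hk
  | cons x xs =>
      have h2 : ((x :: xs).foldl
          (fun (st : List Int × Option Int) x =>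
            let cur := match st.2 with
              | none => x
              | some c => if x > c then x else c
            (st.1 ++ [cur], some cur))
          ([], none)).1 = [x] ++ smax x xs := pmLoop_inv xs [x] x
      rw [h2]
      cases k with
      | zero => simp [mp]
      | succ m =>
          simp only [List.cons_append, List.nil_append, List.getD_cons_succ, mp]
          exact smax_getD xs x m (by simpa using hk)

-- B's weighted running-max fold, as a pure recursion
def WS : Int → Int → List Int → Int
  | _, _, [] => 0
  | c, w, x :: xs => w * max c x + WS (max c x) (w + 1) xs

theorem totalLoop_inv : ∀ (xs : List Int) (t c w : Int),
    (xs.foldl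
      (fun (st : Int × Option Int × Int) x =>
        let cur := match st.2.1 with
          | none => x
          | some c => if x > c then x else c
        (st.1 + st.2.2 * cur, some cur, st.2.2 + 1))
      (t, some c, w)).1 = t + WS c w xs
  | [], t, c, w => by simp [WS]
  | x :: xs, t, c, w => by
      refine (totalLoop_inv xs (t + w * (if x > c then x else c)) (if x > c then x else c) (w + 1)).trans ?_
      rw [if_max, WS]
      ring

theorem WS_eq : ∀ (xs : List Int) (c w : Int),
    WS c w xs = ((List.range xs.length).map (fun k => (w + k) * max c (mp xs k))).sum
  | [], c, w => by simp [WS]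
  | x :: xs, c, w => by
      rw [WS, WS_eq xs (max c x) (w + 1), List.length_cons, List.range_succ_eq_map,
        List.map_cons, List.sum_cons, List.map_map]
      have hc : ∀ k ∈ List.range xs.length,
          ((fun k : Nat => (w + (k : Int)) * max c (mp (x :: xs) k)) ∘ Nat.succ) k
            = ((w + 1) + (k : Int)) * max (max c x) (mp xs k) := by
        intro k _
        simp only [Function.comp_apply, mp, max_assoc]
        push_cast
        ring
      rw [List.map_congr_left hc]
      simp only [mp, Nat.cast_zero]
      ring

-- running-max weighted sum over the whole list = Σ (k+1) * mp xs k
theorem total_eq (xs : List Int) :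
    (xs.foldl
      (fun (st : Int × Option Int × Int) x =>
        let cur := match st.2.1 with
          | none => x
          | some c => if x > c then x else c
        (st.1 + st.2.2 * cur, some cur, st.2.2 + 1))
      (0, none, 1)).1
    = ((List.range xs.length).map (fun k : Nat => ((k : Int) + 1) * mp xs k)).sum := by
  cases xs with
  | nil => simp
  | cons x xs =>
      have h2 : ((x :: xs).foldl
          (fun (st : Int × Option Int × Int) x =>
            let cur := match st.2.1 with
              | none => x
              | some c => if x > c then x else c
            (st.1 + st.2.2 * cur, some cur, st.2.2 + 1))
          (0, none, 1)).1 = (0 + 1 * x) + WS x (1 + 1) xs := totalLoop_inv xs (0 + 1 * x) x (1 + 1)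
      rw [h2, WS_eq xs x (1 + 1), List.length_cons, List.range_succ_eq_map,
        List.map_cons, List.sum_cons, List.map_map]
      have hc : ∀ k ∈ List.range xs.length,
          ((fun k : Nat => ((k : Int) + 1) * mp (x :: xs) k) ∘ Nat.succ) k
            = ((1 + 1) + (k : Int)) * max x (mp xs k) := by
        intro k _
        simp only [Function.comp_apply, mp]
        push_cast
        ring
      rw [List.map_congr_left hc]
      simp only [mp, Nat.cast_zero]
      ring

-- A's summation loop over indices is the list sum
theorem idx_sum (xs : List Int) (s : Int) :
    (List.range xs.length).foldl (fun kv (i : Nat) => kv + PySem.List.pyGetD xs (i : Int) 0) s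
      = s + xs.sum := by
  rw [PySem.List.foldl_add (List.range xs.length) (fun i : Nat => PySem.List.pyGetD xs (i : Int) 0) s]
  congr 1
  have hmap : (List.range xs.length).map (fun i : Nat => PySem.List.pyGetD xs (i : Int) 0) = xs := by
    apply List.ext_getElem
    · simp
    · intro k h1 h2
      simp [List.getElem?_eq_getElem h2]
  rw [hmap]

-- double counting: Σ_{i<m} Σ_{j<m-i} f(i+j) = Σ_{k<m} (k+1) f(k)
theorem double_count : ∀ (m : Nat) (f : Nat → Int),
    ((List.range m).map (fun i : Nat => ((List.range (m - i)).map (fun j : Nat => f (i + j))).sum)).sum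
      = ((List.range m).map (fun k : Nat => ((k : Int) + 1) * f k)).sum
  | 0, f => by simp
  | m + 1, f => by
      have inner : ∀ i ∈ List.range m,
          ((List.range (m + 1 - i)).map (fun j : Nat => f (i + j))).sum
            = ((List.range (m - i)).map (fun j => f (i + j))).sum + f m := by
        intro i hi
        have him : i < m := List.mem_range.mp hi
        have h1 : m + 1 - i = (m - i) + 1 := by omega
        have h2 : i + (m - i) = m := by omega
        rw [h1, List.range_succ, List.map_append, List.sum_append]
        simp [h2]
      rw [List.range_succ, List.map_append, List.map_append, List.sum_append, List.sum_append,
        List.map_congr_left inner]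
      have split : ((List.range m).map
            (fun i : Nat => ((List.range (m - i)).map (fun j : Nat => f (i + j))).sum + f m)).sum
          = ((List.range m).map
            (fun i : Nat => ((List.range (m - i)).map (fun j : Nat => f (i + j))).sum)).sum + (m : Int) * f m := by
        rw [PySem.List.sum_map_add_int]
        congr 1
        rw [PySem.List.sum_map_const_int]
        simp [mul_comm]
      rw [split, double_count m f]
      simp
      ring

-- A's sum of transform xs, via the flatMap shape
theorem sum_transform (xs : List Int) :
    (transform xs).sum = ((List.range xs.length).map (fun k : Nat => ((k : Int) + 1) * mp xs k)).sum := by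
  rw [transform_eq]
  unfold sL
  rw [List.flatMap_def, List.sum_flatten, List.map_map]
  exact double_count xs.length (mp xs)

-- B's sA list equals transform a
theorem sA_eq (a : List Int) :
    (List.range a.length).flatMap (fun i =>
      (List.range (a.length - i)).map (fun j =>
        PySem.List.pyGetD ((a.foldl
          (fun (st : List Int × Option Int) x =>
            let cur := match st.2 with
              | none => x
              | some c => if x > c then x else c
            (st.1 ++ [cur], some cur))
          ([], none)).1) ((i + j : Nat) : Int) 0))
    = transform a := by
  rw [transform_eq]
  unfold sL
  apply List.flatMap_congr
  intro i hi
  apply List.map_congr_left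
  intro j hj
  simp only [PySem.List.pyGetD_natCast]
  exact pm_getD a (i + j) (by simp only [List.mem_range] at hi hj; omega)

-- ===== VERDICT (by name: the statement is the Claim_ definition above) =====
theorem TransformTransform_spec : Claim_equal_TransformTransform := by
  intro a n _
  unfold Spec_TransformTransform TransformTransform TransformTransform_alt
  simp only
  rw [idx_sum, sA_eq, total_eq, ← sum_transform (transform a)]
  simp
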